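-- pv_equiv track=rewrite | github.com/matmat/betygutils | betyg.py | has_single_digit_difference
-- ===== SOURCE A (Python) =====
-- def has_single_digit_difference(pnr1, pnr2):
--     """Check if two personnummer have exactly one digit difference."""
--     if len(pnr1) != len(pnr2):
--         return False
--
--     # Remove hyphens for comparison
--     clean_pnr1 = pnr1.replace('-', '')
--     clean_pnr2 = pnr2.replace('-', '')
--
--     if len(clean_pnr1) != len(clean_pnr2):
--         return False
--
--     differences = sum(1 for c1, c2 in zip(clean_pnr1, clean_pnr2) if c1 != c2)
--     return differences == 1
-- ===== SOURCE B (Python) =====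
-- def has_single_digit_difference(pnr1, pnr2):
--     """Check if two personnummer have exactly one digit difference."""
--     if len(pnr1) != len(pnr2):
--         return False
--
--     clean1 = pnr1.replace('-', '')
--     clean2 = pnr2.replace('-', '')
--
--     if len(clean1) != len(clean2):
--         return False
--
--     # find the first index where they differ; exactly-one-difference
--     # holds iff such an index exists and the remainders are equal
--     i = 0
--     n = len(clean1)
--     while i < n and clean1[i] == clean2[i]:
--         i += 1
--     if i == n:
--         return False
--     return clean1[i + 1:] == clean2[i + 1:]
-- ===== Notes on version B (the rewrite author's own statement) =====
-- stated objective: alternative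
-- what changed: Instead of counting all mismatched characters and testing count == 1, B scans for the first mismatch index and then checks that the two suffixes after it are equal, short-circuiting on a second mismatch and using native slice comparison for the tail.
import Mathlib
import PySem

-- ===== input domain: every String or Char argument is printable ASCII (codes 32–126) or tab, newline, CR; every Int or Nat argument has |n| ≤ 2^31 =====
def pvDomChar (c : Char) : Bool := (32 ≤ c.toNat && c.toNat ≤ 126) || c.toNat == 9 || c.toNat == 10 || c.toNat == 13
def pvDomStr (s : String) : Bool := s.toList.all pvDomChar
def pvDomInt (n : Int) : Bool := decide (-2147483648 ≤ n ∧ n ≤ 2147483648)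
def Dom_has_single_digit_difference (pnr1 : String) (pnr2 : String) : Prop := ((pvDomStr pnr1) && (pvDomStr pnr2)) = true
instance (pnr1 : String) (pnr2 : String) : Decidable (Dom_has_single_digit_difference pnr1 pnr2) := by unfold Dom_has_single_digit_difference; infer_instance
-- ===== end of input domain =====

-- B replaces A's count-all-mismatches-and-compare-to-1 with a first-mismatch scan
-- followed by an equality test on the remaining suffixes (objective: alternative).

-- ===== PORT A =====
-- the body of A's generator expression: add 1 to the running sum when the pair differs
def pvStep (acc : Int) (p : Char × Char) : Int := if p.1 != p.2 then acc + 1 else acc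

def has_single_digit_difference (pnr1 : String) (pnr2 : String) : Bool :=
  if PySem.Str.len pnr1 != PySem.Str.len pnr2 then false
  else
    let clean_pnr1 := PySem.Str.replace pnr1 "-" ""
    let clean_pnr2 := PySem.Str.replace pnr2 "-" ""
    if PySem.Str.len clean_pnr1 != PySem.Str.len clean_pnr2 then false
    else
      let differences : Int := (clean_pnr1.toList.zip clean_pnr2.toList).foldl pvStep 0
      differences == 1

-- ===== PORT B =====
-- the while loop of Source B: walk to the first mismatch, returning the two
-- suffixes after it (none = the strings match up to the shorter length)
def pvFirstMismatch : List Char → List Char → Option (List Char × List Char)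
  | a :: x, b :: y => if a == b then pvFirstMismatch x y else some (x, y)
  | _, _ => none

def has_single_digit_difference_alt (pnr1 : String) (pnr2 : String) : Bool :=
  if PySem.Str.len pnr1 != PySem.Str.len pnr2 then false
  else
    let clean1 := PySem.Str.replace pnr1 "-" ""
    let clean2 := PySem.Str.replace pnr2 "-" ""
    if PySem.Str.len clean1 != PySem.Str.len clean2 then false
    else
      match pvFirstMismatch clean1.toList clean2.toList with
      | none => false
      | some (x, y) => x == y

-- ===== PRECONDITION & SPEC =====
def Spec_has_single_digit_difference (pnr1 : String) (pnr2 : String) (out : Bool) : Prop := out = has_single_digit_difference_alt pnr1 pnr2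
instance (pnr1 : String) (pnr2 : String) (out : Bool) : Decidable (Spec_has_single_digit_difference pnr1 pnr2 out) := by unfold Spec_has_single_digit_difference; infer_instance

-- ===== CLAIM (what is proved, stated in full; the proofs are below) =====
def Claim_equal_has_single_digit_difference : Prop := ∀ (pnr1 : String) (pnr2 : String), Dom_has_single_digit_difference pnr1 pnr2 → Spec_has_single_digit_difference pnr1 pnr2 (has_single_digit_difference pnr1 pnr2)

-- ===== LEMMAS AND PROOFS =====

theorem pvStep_eq (acc : Int) (a b : Char) (h : a = b) : pvStep acc (a, b) = acc := by
  simp [pvStep, h]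

theorem pvStep_ne (acc : Int) (a b : Char) (h : a ≠ b) : pvStep acc (a, b) = acc + 1 := by
  simp [pvStep, h]

theorem pvFoldl_shift (z : List (Char × Char)) (acc : Int) :
    z.foldl pvStep acc = acc + z.foldl pvStep 0 := by
  induction z generalizing acc with
  | nil => simp
  | cons hd tl ih =>
    obtain ⟨a, b⟩ := hd
    simp only [List.foldl_cons]
    by_cases h : a = b
    · rw [pvStep_eq _ _ _ h, pvStep_eq _ _ _ h]; exact ih acc
    · rw [pvStep_ne _ _ _ h, pvStep_ne _ _ _ h, ih (acc + 1), ih (0 + 1)]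
      ring

theorem pvFoldl_nonneg (z : List (Char × Char)) : 0 ≤ z.foldl pvStep (0 : Int) := by
  induction z with
  | nil => simp
  | cons hd tl ih =>
    obtain ⟨a, b⟩ := hd
    simp only [List.foldl_cons]
    rw [pvFoldl_shift]
    by_cases h : a = b
    · rw [pvStep_eq _ _ _ h]; omega
    · rw [pvStep_ne _ _ _ h]; omega

theorem pvFoldl_zero_iff (l1 l2 : List Char) (h : l1.length = l2.length) :
    ((l1.zip l2).foldl pvStep (0 : Int) = 0) ↔ l1 = l2 := by
  induction l1 generalizing l2 with
  | nil => cases l2 <;> simp_all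
  | cons a x ih =>
    cases l2 with
    | nil => simp at h
    | cons b y =>
      simp only [List.length_cons, Nat.add_right_cancel_iff] at h
      simp only [List.zip_cons_cons, List.foldl_cons]
      have hn := pvFoldl_nonneg (x.zip y)
      by_cases hab : a = b
      · rw [pvStep_eq _ _ _ hab, ih y h]
        simp [hab]
      · rw [pvStep_ne _ _ _ hab, pvFoldl_shift]
        constructor
        · intro hc; omega
        · intro hc; exact absurd (List.cons.injEq .. ▸ hc).1 hab

theorem pvKey (l1 l2 : List Char) (h : l1.length = l2.length) :
    (((l1.zip l2).foldl pvStep (0 : Int)) == 1)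
      = (match pvFirstMismatch l1 l2 with
         | none => false
         | some (x, y) => x == y) := by
  induction l1 generalizing l2 with
  | nil => cases l2 <;> simp_all [pvFirstMismatch]
  | cons a x ih =>
    cases l2 with
    | nil => simp at h
    | cons b y =>
      simp only [List.length_cons, Nat.add_right_cancel_iff] at h
      simp only [List.zip_cons_cons, List.foldl_cons, pvFirstMismatch]
      by_cases hab : a = b
      · rw [pvStep_eq _ _ _ hab]
        simp only [show (a == b) = true by simp [hab]]
        exact ih y h
      · rw [pvStep_ne _ _ _ hab, pvFoldl_shift]
        simp only [show (a == b) = false by simp [hab], Bool.false_eq_true]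
        have hn := pvFoldl_nonneg (x.zip y)
        have hz := pvFoldl_zero_iff x y h
        by_cases hxy : x = y
        · subst hxy; rw [hz.2 rfl]; simp
        · have : (x.zip y).foldl pvStep (0 : Int) ≠ 0 := fun hc => hxy (hz.1 hc)
          have h1 : ((0 : Int) + 1 + (x.zip y).foldl pvStep 0 == 1) = false := by
            simp only [beq_eq_false_iff_ne, ne_eq]; omega
          rw [h1]
          simp [hxy]

-- ===== VERDICT (by name: the statement is the Claim_ definition above) =====
theorem has_single_digit_difference_spec : Claim_equal_has_single_digit_difference := by
  intro pnr1 pnr2 _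
  show has_single_digit_difference pnr1 pnr2 = has_single_digit_difference_alt pnr1 pnr2
  unfold has_single_digit_difference has_single_digit_difference_alt
  by_cases h1 : (PySem.Str.len pnr1 != PySem.Str.len pnr2) = true
  · rw [if_pos h1, if_pos h1]
  · rw [if_neg h1, if_neg h1]
    by_cases h2 : (PySem.Str.len (PySem.Str.replace pnr1 "-" "") != PySem.Str.len (PySem.Str.replace pnr2 "-" "")) = true
    · rw [if_pos h2, if_pos h2]
    · rw [if_neg h2, if_neg h2]
      apply pvKey
      simpa [bne, PySem.Str.len] using h2
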